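-- pv_equiv track=rewrite | github.com/baizhi1997/WSM | 2 索引和后端逻辑/get_hashtag.py | getHashTagContent
-- ===== SOURCE A (Python) =====
-- def getHashTagContent(str):
--     content = str
--     first_hash_tag = -1
--     second_hash_tag = -1
--     for index,single in zip(range(0,len(content)),content):
--         if single == "#":
--             if first_hash_tag == -1:
--                 first_hash_tag = index
--             else:
--                 second_hash_tag = index
--                 break
--     if first_hash_tag == -1 or second_hash_tag==-1:
--         return ""
--     return content[first_hash_tag+1:second_hash_tag]
-- ===== SOURCE B (Python) =====
-- def getHashTagContent(str):
--     parts = str.split('#')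
--     return parts[1] if len(parts) >= 3 else ''
-- ===== Notes on version B (the rewrite author's own statement) =====
-- stated objective: faster
-- what changed: Replaces the early-exit index-tracking scan (recording the first two hash positions, then slicing) with a staged whole-string split('#') into a list of all segments, returning segment 1 exactly when at least three segments exist; the single C-level split call makes it measurably faster.
import Mathlib
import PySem

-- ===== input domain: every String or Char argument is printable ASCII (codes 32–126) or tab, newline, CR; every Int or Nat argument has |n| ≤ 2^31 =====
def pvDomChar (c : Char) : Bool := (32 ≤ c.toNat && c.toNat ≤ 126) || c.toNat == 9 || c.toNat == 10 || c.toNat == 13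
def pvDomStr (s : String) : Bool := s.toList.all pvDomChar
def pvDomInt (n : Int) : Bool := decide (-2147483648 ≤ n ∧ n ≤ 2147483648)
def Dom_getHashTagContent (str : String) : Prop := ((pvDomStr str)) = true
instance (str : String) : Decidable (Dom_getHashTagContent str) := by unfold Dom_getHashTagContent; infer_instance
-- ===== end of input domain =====

-- B replaces A's early-exit scan for the first two '#' positions with one whole-string
-- split('#') into all segments, returning segment 1 when at least three exist; objective: faster (measured, constant-factor: one C-level split call).

-- ===== PORT A =====
-- the for-loop over zip(range(0,len(content)), content) with its break
def pvLoopA : List (Int × Char) → Int → Int → Int × Int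
  | [], f, s => (f, s)
  | (i, c) :: rest, f, s =>
      if c = '#' then
        if f = -1 then pvLoopA rest i s
        else (f, i)        -- second_hash_tag = index; break
      else pvLoopA rest f s

def getHashTagContent (str : String) : String :=
  let content := str
  let r := pvLoopA (PySem.List.enumerate content.toList 0) (-1) (-1)
  if r.1 = -1 ∨ r.2 = -1 then ""
  else PySem.Str.slice content (some (r.1 + 1)) (some r.2)

-- ===== PORT B =====
-- parts = str.split('#'); return parts[1] if len(parts) >= 3 else ''
-- (the guard guarantees the index is in range, so the Option is some; getD "" is never used)
def getHashTagContent_alt (str : String) : String :=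
  let parts := PySem.Chars.splitOn str.toList "#".toList
  if 3 ≤ parts.length then String.ofList ((PySem.List.pyGet? parts 1).getD []) else ""

-- ===== PRECONDITION & SPEC =====
def Spec_getHashTagContent (str : String) (out : String) : Prop := out = getHashTagContent_alt str
instance (str : String) (out : String) : Decidable (Spec_getHashTagContent str out) := by unfold Spec_getHashTagContent; infer_instance

-- ===== CLAIM (what is proved, stated in full; the proofs are below) =====
def Claim_equal_getHashTagContent : Prop := ∀ (str : String), Dom_getHashTagContent str → Spec_getHashTagContent str (getHashTagContent str)

-- ===== LEMMAS AND PROOFS =====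

-- the predicate "is not '#'" (used in the proofs' characterisations of both ports)
def pvNotHash (c : Char) : Bool := c ≠ '#'

theorem pvNotHash_true {c : Char} (hc : ¬ c = '#') : pvNotHash c = true := by
  simp [pvNotHash, hc]

theorem pvNotHash_false {c : Char} (hc : c = '#') : pvNotHash c = false := by
  simp [pvNotHash, hc]

-- second phase of A's loop: first hash already found (f ≠ -1), scanning r from index k
theorem pvLoopA_phase2 (r : List Char) (k f : Int) (hf : f ≠ -1) :
    pvLoopA (PySem.List.enumerate r k) f (-1) =
      (match r.dropWhile pvNotHash with
       | [] => (f, (-1 : Int))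
       | _ :: _ => (f, k + (r.takeWhile pvNotHash).length)) := by
  induction r generalizing k with
  | nil => simp [PySem.List.enumerate_nil, pvLoopA]
  | cons c cs ih =>
      rw [PySem.List.enumerate_cons, List.dropWhile_cons, List.takeWhile_cons]
      by_cases hc : c = '#'
      · rw [pvNotHash_false hc]
        simp only [pvLoopA, if_pos hc, if_neg hf, Bool.false_eq_true, if_false]
        simp
      · rw [pvNotHash_true hc]
        simp only [pvLoopA, if_neg hc]
        rw [ih (k + 1)]
        cases h : cs.dropWhile pvNotHash with
        | nil => simp
        | cons a b => simp; ring

-- first phase of A's loop: no hash seen yet, scanning cs from index k ≥ 0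
theorem pvLoopA_phase1 (cs : List Char) (k : Int) (hk : 0 ≤ k) :
    pvLoopA (PySem.List.enumerate cs k) (-1) (-1) =
      (match cs.dropWhile pvNotHash with
       | [] => ((-1 : Int), (-1 : Int))
       | _ :: rest =>
          match rest.dropWhile pvNotHash with
          | [] => (k + (cs.takeWhile pvNotHash).length, (-1 : Int))
          | _ :: _ => (k + (cs.takeWhile pvNotHash).length,
                       k + (cs.takeWhile pvNotHash).length + 1 + (rest.takeWhile pvNotHash).length)) := by
  induction cs generalizing k with
  | nil => simp [PySem.List.enumerate_nil, pvLoopA]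
  | cons c cs ih =>
      rw [PySem.List.enumerate_cons, List.dropWhile_cons, List.takeWhile_cons]
      by_cases hc : c = '#'
      · have hk' : k ≠ -1 := by omega
        rw [pvNotHash_false hc]
        simp only [pvLoopA, if_pos hc, Bool.false_eq_true, if_false]
        rw [pvLoopA_phase2 cs (k + 1) k hk']
        cases h : cs.dropWhile pvNotHash with
        | nil => simp
        | cons a b => simp
      · rw [pvNotHash_true hc]
        simp only [pvLoopA, if_neg hc]
        rw [ih (k + 1) (by omega)]
        cases h : cs.dropWhile pvNotHash with
        | nil => simp
        | cons a b =>
            cases h2 : b.dropWhile pvNotHash with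
            | nil => simp [h2, Prod.mk.injEq]; try omega
            | cons u v => simp [h2, Prod.mk.injEq]; try omega

-- a fuel-free reference function for splitOn at sep = "#"
def pvSplit : List Char → List Char → List (List Char)
  | cur, [] => [cur.reverse]
  | cur, c :: rest => if c = '#' then cur.reverse :: pvSplit [] rest else pvSplit (c :: cur) rest

theorem pvSplit_go (l : List Char) : ∀ (fuel : Nat) (cur : List Char) (acc : List (List Char)), l.length < fuel →
    PySem.Chars.splitOn.go "#".toList fuel l cur acc = acc.reverse ++ pvSplit cur l := by
  induction l with
  | nil =>
      intro fuel cur acc h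
      match fuel with
      | f + 1 => simp [PySem.Chars.splitOn.go, pvSplit]
  | cons c rest ih =>
      intro fuel cur acc h
      match fuel with
      | f + 1 =>
        simp only [PySem.Chars.splitOn.go]
        by_cases hc : c = '#'
        · subst hc
          rw [if_pos (by simp [List.isPrefixOf])]
          have hd : List.drop "#".toList.length ('#' :: rest) = rest := by simp
          rw [hd, ih f [] (cur.reverse :: acc) (by simpa using Nat.lt_of_succ_lt_succ h)]
          simp [pvSplit]
        · rw [if_neg (by simp [List.isPrefixOf]; exact fun h' => hc h'.symm)]
          rw [ih f (c :: cur) acc (by exact Nat.lt_of_succ_lt_succ h)]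
          simp [pvSplit, hc]

theorem pvSplitOn_eq (cs : List Char) :
    PySem.Chars.splitOn cs "#".toList = pvSplit [] cs := by
  unfold PySem.Chars.splitOn
  rw [pvSplit_go cs (cs.length + 1) [] [] (by omega)]
  simp

-- pvSplit in terms of takeWhile/dropWhile at pvNotHash
theorem pvSplit_eq (l : List Char) : ∀ cur : List Char,
    pvSplit cur l = (cur.reverse ++ l.takeWhile pvNotHash) ::
      (match l.dropWhile pvNotHash with
       | [] => ([] : List (List Char))
       | _ :: rest => pvSplit [] rest) := by
  induction l with
  | nil => intro cur; simp [pvSplit]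
  | cons c rest ih =>
      intro cur
      rw [List.takeWhile_cons, List.dropWhile_cons]
      by_cases hc : c = '#'
      · rw [pvNotHash_false hc]
        simp [pvSplit, hc]
      · rw [pvNotHash_true hc]
        simp only [pvSplit, if_neg hc]
        rw [ih (c :: cur)]
        simp

-- if dropWhile pvNotHash cs = a :: b then cs splits as takeWhile ++ '#' :: b
theorem pv_decomp (cs : List Char) (a : Char) (b : List Char)
    (h : cs.dropWhile pvNotHash = a :: b) :
    cs = cs.takeWhile pvNotHash ++ '#' :: b := by
  have ha : a = '#' := by
    have hw : cs.dropWhile pvNotHash ≠ [] := by simp [h]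
    have := List.head_dropWhile_not pvNotHash hw
    simp [h, pvNotHash] at this
    exact this
  have := List.takeWhile_append_dropWhile (p := pvNotHash) (l := cs)
  rw [h, ha] at this
  exact this.symm

theorem pv_string_eq_of_toList {s t : String} (h : s.toList = t.toList) : s = t := by
  have := congrArg String.ofList h
  simpa using this

-- ===== VERDICT (by name: the statement is the Claim_ definition above) =====
theorem getHashTagContent_spec : Claim_equal_getHashTagContent := by
  intro str _
  unfold Spec_getHashTagContent getHashTagContent getHashTagContent_alt
  dsimp only
  rw [pvLoopA_phase1 str.toList 0 le_rfl, pvSplitOn_eq, pvSplit_eq]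
  cases h : str.toList.dropWhile pvNotHash with
  | nil => simp
  | cons a b =>
      dsimp only
      simp only [pvSplit_eq b]
      by_cases hb : b.dropWhile pvNotHash = []
      · simp [hb]
      · obtain ⟨u, v, huv⟩ : ∃ u v, b.dropWhile pvNotHash = u :: v := by
          cases hx : b.dropWhile pvNotHash with
          | nil => exact absurd hx hb
          | cons u v => exact ⟨u, v, rfl⟩
        simp only [huv]
        have hlen : 3 ≤ ((([] : List Char).reverse ++ str.toList.takeWhile pvNotHash) ::
            (([] : List Char).reverse ++ b.takeWhile pvNotHash) :: (pvSplit [] v)).length := by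
          rw [pvSplit_eq v]; simp
        split_ifs with hcon
        · exfalso; revert hcon; omega
        · apply pv_string_eq_of_toList
          rw [PySem.Str.toList_slice]
          set t := str.toList.takeWhile pvNotHash with hT
          set mid := b.takeWhile pvNotHash with hM
          have e1 : (0 : Int) + ↑t.length + 1 = ((t.length + 1 : Nat) : Int) := by push_cast; ring
          rw [e1]
          simp only [PySem.Chars.slice_eq_listSlice]
          rw [PySem.List.slice_natCast_add]
          have hdec := pv_decomp str.toList a b h
          rw [← hT] at hdec
          have hdrop : str.toList.drop (t.length + 1) = b := by
            rw [hdec]; simp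
          rw [hdrop]
          have hpre : mid <+: b := List.takeWhile_prefix _
          rw [← List.prefix_iff_eq_take.mp hpre]
          simp [PySem.List.pyGet?, PySem.List.pyIdx?]
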